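-- pv_equiv track=rewrite | github.com/wesleymaya/pythonLabs | lab4_WesleyMaya.py | mess
-- ===== SOURCE A (Python) =====
-- def mess(string1):
--
--     '''
--     (str) -> str
--
--     Description
--     This function takes a String and returns that string, but capitalizes any letters in the string that are in the string "rstvwxyz".
--
--     Pre-Conditions
--     string1 must be a String.
--     '''
--
--     string2 = ""
--
--     for character in string1:
--         if character == " ":
--             string2 = string2 + '-'
--         #if 's' in "silly"
--         elif character in "rstvwxyz":
--             string2 = string2 + character.upper()
--         else:
--             string2 = string2 + character
--
--
--     return string2
-- ===== SOURCE B (Python) =====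
-- def mess(string1):
--     '''Same transformation done as staged whole-string passes: one replace per
--     character pair, instead of a single per-character loop with branches.
--     Correct because the nine replaced characters are pairwise distinct and no
--     replacement output ('-' or an uppercase letter) is itself replaced later.'''
--     result = string1.replace(' ', '-')
--     for ch in "rstvwxyz":
--         result = result.replace(ch, ch.upper())
--     return result
-- ===== Notes on version B (the rewrite author's own statement) =====
-- stated objective: alternative
-- what changed: Replaces the single per-character loop with three branches and repeated string concatenation by nine staged whole-string str.replace passes (space to dash, then each of rstvwxyz to its uppercase), correct because the nine targets are disjoint and no replacement output is a later target.
import Mathlib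
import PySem

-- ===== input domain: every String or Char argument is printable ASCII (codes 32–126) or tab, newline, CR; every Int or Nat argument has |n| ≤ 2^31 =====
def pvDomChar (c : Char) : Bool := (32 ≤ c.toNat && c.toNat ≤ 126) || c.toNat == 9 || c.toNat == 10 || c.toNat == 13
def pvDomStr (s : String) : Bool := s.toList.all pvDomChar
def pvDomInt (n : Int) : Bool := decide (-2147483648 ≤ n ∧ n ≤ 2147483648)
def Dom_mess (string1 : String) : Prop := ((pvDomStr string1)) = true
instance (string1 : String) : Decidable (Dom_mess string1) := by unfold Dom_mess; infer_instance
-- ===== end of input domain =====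

-- B does nine staged whole-string replace passes instead of A's single per-character loop with branches.
-- ===== PORT A =====
def mess (string1 : String) : String :=
  String.ofList (string1.toList.foldl (fun string2 character =>
    if character = ' ' then string2 ++ ['-']
    else if character ∈ "rstvwxyz".toList then string2 ++ [PySem.Chars.upperChar character]
    else string2 ++ [character]) [])

-- ===== PORT B =====
def mess_alt (string1 : String) : String :=
  let result := PySem.Str.replace string1 " " "-"
  "rstvwxyz".toList.foldl
    (fun result ch =>
      PySem.Str.replace result (String.ofList [ch]) (String.ofList [PySem.Chars.upperChar ch]))
    result

-- ===== PRECONDITION & SPEC =====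
def Spec_mess (string1 : String) (out : String) : Prop := out = mess_alt string1
instance (string1 : String) (out : String) : Decidable (Spec_mess string1 out) := by unfold Spec_mess; infer_instance

-- ===== CLAIM (what is proved, stated in full; the proofs are below) =====
def Claim_equal_mess : Prop := ∀ (string1 : String), Dom_mess string1 → Spec_mess string1 (mess string1)

-- ===== LEMMAS AND PROOFS =====
-- replace with a single-character pattern and single-character replacement is a map
theorem replace_go_single (c u : Char) :
    ∀ (l acc : List Char) (fuel : Nat), l.length ≤ fuel →
      PySem.Chars.replace.go [c] [u] fuel l acc
        = acc.reverse ++ l.map (fun x => if x = c then u else x) := by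
  intro l
  induction l with
  | nil =>
    intro acc fuel _
    cases fuel <;> simp [PySem.Chars.replace.go]
  | cons x t ih =>
    intro acc fuel hle
    cases fuel with
    | zero => simp at hle
    | succ n =>
      by_cases hx : x = c
      · subst hx
        have hpre : List.isPrefixOf [x] (x :: t) = true := by
          simp [List.isPrefixOf]
        simp only [PySem.Chars.replace.go, hpre, if_true, List.length_singleton,
          List.drop_succ_cons, List.drop_zero]
        rw [ih (([u].reverse ++ acc)) n (by simpa using Nat.le_of_succ_le_succ hle)]
        simp
      · have hpre : List.isPrefixOf [c] (x :: t) = false := by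
          simp [List.isPrefixOf]
          exact fun h => absurd h.symm hx
        simp only [PySem.Chars.replace.go, hpre]
        rw [ih (x :: acc) n (by simpa using Nat.le_of_succ_le_succ hle)]
        simp [hx]

theorem replace_single (c u : Char) (l : List Char) :
    PySem.Chars.replace l [c] [u] = l.map (fun x => if x = c then u else x) := by
  unfold PySem.Chars.replace
  simp [replace_go_single c u l [] l.length (le_refl _)]

-- A's accumulator fold is a map over the characters
def messChar (c : Char) : Char :=
  if c = ' ' then '-'
  else if c ∈ "rstvwxyz".toList then PySem.Chars.upperChar c
  else c

theorem mess_foldl (l : List Char) (acc : List Char) :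
    l.foldl (fun string2 character =>
      if character = ' ' then string2 ++ ['-']
      else if character ∈ "rstvwxyz".toList then string2 ++ [PySem.Chars.upperChar character]
      else string2 ++ [character]) acc = acc ++ l.map messChar := by
  induction l generalizing acc with
  | nil => simp
  | cons c cs ih =>
    simp only [List.foldl_cons, List.map_cons, ih, messChar]
    split_ifs <;> simp

-- the nine staged single-char maps compose to messChar
def swap1 (c : Char) (x : Char) : Char := if x = c then PySem.Chars.upperChar c else x

theorem staged_eq_messChar (x : Char) :
    swap1 'z' (swap1 'y' (swap1 'x' (swap1 'w' (swap1 'v' (swap1 't' (swap1 's' (swap1 'r'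
      (if x = ' ' then '-' else x)))))))) = messChar x := by
  by_cases h0 : x = ' '
  · subst h0; decide
  by_cases h1 : x = 'r'
  · subst h1; decide
  by_cases h2 : x = 's'
  · subst h2; decide
  by_cases h3 : x = 't'
  · subst h3; decide
  by_cases h4 : x = 'v'
  · subst h4; decide
  by_cases h5 : x = 'w'
  · subst h5; decide
  by_cases h6 : x = 'x'
  · subst h6; decide
  by_cases h7 : x = 'y'
  · subst h7; decide
  by_cases h8 : x = 'z'
  · subst h8; decide
  simp only [messChar, swap1,
    show ("rstvwxyz".toList) = ['r','s','t','v','w','x','y','z'] from by decide,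
    List.mem_cons, List.not_mem_nil, or_false]
  simp [h0, h1, h2, h3, h4, h5, h6, h7, h8]

theorem foldl_replace_toList (cs : List Char) (t : String) :
    (cs.foldl (fun result ch =>
        PySem.Str.replace result (String.ofList [ch]) (String.ofList [PySem.Chars.upperChar ch]))
      t).toList
    = cs.foldl (fun l ch => l.map (swap1 ch)) t.toList := by
  induction cs generalizing t with
  | nil => simp
  | cons c cs ih =>
    simp only [List.foldl_cons, ih, PySem.Str.toList_replace, String.toList_ofList,
      replace_single]
    rfl

theorem mess_alt_toList (s : String) :
    (mess_alt s).toList = s.toList.map messChar := by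
  unfold mess_alt
  rw [foldl_replace_toList]
  have hsp : (PySem.Str.replace s " " "-").toList
      = s.toList.map (fun x => if x = ' ' then '-' else x) := by
    rw [PySem.Str.toList_replace,
      show (" " : String).toList = [' '] from by decide,
      show ("-" : String).toList = ['-'] from by decide, replace_single]
  rw [hsp]
  simp only [show ("rstvwxyz".toList) = ['r','s','t','v','w','x','y','z'] from by decide,
    List.foldl_cons, List.foldl_nil, List.map_map]
  apply List.map_congr_left
  intro x _
  simpa [Function.comp] using staged_eq_messChar x

-- ===== VERDICT (by name: the statement is the Claim_ definition above) =====
theorem mess_spec : Claim_equal_mess := by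
  intro s _
  unfold Spec_mess mess
  rw [mess_foldl, List.nil_append, ← mess_alt_toList s, String.ofList_toList]
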